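-- pv_equiv track=rewrite | github.com/Iusto/pgms | lv2/할인 행사.py | solution
-- ===== SOURCE A (Python) =====
-- def solution(want, number, discount):
--     answer = 0
--     shopping_list = {}
--     for i in range(len(want)) :
--         shopping_list[want[i]] = number[i]
--     from collections import Counter
--     shopping_list = Counter(shopping_list)
--     for i in range(len(discount)-9) :
--         sale = Counter(discount[i:i+10])
--         if len(shopping_list - sale) == 0 :
--             answer += 1
--     return answer
-- ===== SOURCE B (Python) =====
-- def solution(want, number, discount):
--     req = {}
--     for i in range(len(want)):
--         req[want[i]] = number[i]
--     need = {k: v for k, v in req.items() if v > 0}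
--     n = len(discount)
--     if n < 10:
--         return 0
--     cnt = {}
--     for d in discount[:10]:
--         cnt[d] = cnt.get(d, 0) + 1
--     matched = sum(1 for k, v in need.items() if cnt.get(k, 0) >= v)
--     answer = 1 if matched == len(need) else 0
--     for i in range(1, n - 9):
--         out = discount[i - 1]
--         if out in need and cnt[out] == need[out]:
--             matched -= 1
--         cnt[out] -= 1
--         new = discount[i + 9]
--         cnt[new] = cnt.get(new, 0) + 1
--         if new in need and cnt[new] == need[new]:
--             matched += 1
--         if matched == len(need):
--             answer += 1
--     return answer
-- ===== Notes on version B (the rewrite author's own statement) =====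
-- stated objective: faster
-- what changed: A rebuilds a Counter of every 10-day slice and subtracts the whole wish-dict per window; B filters the positive requirements once and slides the window, updating one count and a 'matched' tally per step, so each window costs O(1) dict work instead of O(window+|want|).
import Mathlib
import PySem

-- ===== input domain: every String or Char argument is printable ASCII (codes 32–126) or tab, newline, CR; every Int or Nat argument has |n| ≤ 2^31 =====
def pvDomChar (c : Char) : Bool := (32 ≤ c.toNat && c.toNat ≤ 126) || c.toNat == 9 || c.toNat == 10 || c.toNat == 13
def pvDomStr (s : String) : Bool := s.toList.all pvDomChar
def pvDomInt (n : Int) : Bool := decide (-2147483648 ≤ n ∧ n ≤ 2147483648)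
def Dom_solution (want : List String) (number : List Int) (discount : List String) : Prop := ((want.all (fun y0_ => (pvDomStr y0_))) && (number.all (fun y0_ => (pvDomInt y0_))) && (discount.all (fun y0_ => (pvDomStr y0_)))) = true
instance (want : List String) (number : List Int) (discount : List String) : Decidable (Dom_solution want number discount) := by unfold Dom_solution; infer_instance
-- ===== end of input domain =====

-- B replaces A's per-window Counter construction and Counter subtraction by a single sliding window
-- that maintains the window's counts and a 'matched' tally of satisfied wanted items (objective: faster).

-- ===== PORT A =====
-- helper: CPython's Counter.__sub__, step for step (keep positive differences of self's items,
-- then positive negations of other's items absent from self)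
def counterSub (c d : PySem.Dict String Int) : PySem.Dict String Int :=
  let r := c.items.foldl
    (fun acc p => let n := p.2 - d.getD p.1 0; if n > 0 then acc.insert p.1 n else acc)
    PySem.Dict.empty
  d.items.foldl
    (fun acc p => if c.contains p.1 then acc else (if 0 - p.2 > 0 then acc.insert p.1 (0 - p.2) else acc))
    r

def solution (want : List String) (number : List Int) (discount : List String) : Int :=
  let shopping_list : PySem.Dict String Int :=
    (PySem.List.pyRange 0 (want.length : Int) 1).foldl
      (fun d i => d.insert (PySem.List.pyGetD want i "") (PySem.List.pyGetD number i 0))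
      PySem.Dict.empty
  (PySem.List.pyRange 0 ((discount.length : Int) - 9) 1).foldl
    (fun answer i =>
      let sale := PySem.Dict.counter (PySem.List.slice discount (some i) (some (i + 10)))
      if (counterSub shopping_list sale).size = 0 then answer + 1 else answer)
    0

-- ===== PORT B =====
def solution_alt (want : List String) (number : List Int) (discount : List String) : Int :=
  let req : PySem.Dict String Int :=
    (PySem.List.pyRange 0 (want.length : Int) 1).foldl
      (fun d i => d.insert (PySem.List.pyGetD want i "") (PySem.List.pyGetD number i 0))
      PySem.Dict.empty
  let need : PySem.Dict String Int :=
    req.items.foldl (fun d p => if p.2 > 0 then d.insert p.1 p.2 else d) PySem.Dict.empty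
  let n : Int := (discount.length : Int)
  if n < 10 then 0
  else
    let cnt : PySem.Dict String Int :=
      (PySem.List.slice discount none (some 10)).foldl
        (fun d x => d.insert x (d.getD x 0 + 1)) PySem.Dict.empty
    let matched : Int :=
      need.items.foldl (fun s p => if cnt.getD p.1 0 ≥ p.2 then s + 1 else s) 0
    let answer : Int := if matched = (need.size : Int) then 1 else 0
    let st :=
      (PySem.List.pyRange 1 (n - 9) 1).foldl
        (fun (st : PySem.Dict String Int × Int × Int) i =>
          let cnt := st.1
          let matched := st.2.1
          let answer := st.2.2
          let out := PySem.List.pyGetD discount (i - 1) ""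
          let matched := if need.contains out = true ∧ cnt.getD out 0 = need.getD out 0 then matched - 1 else matched
          -- 'cnt[out] -= 1': out is in the current window, so the key is present and modify is exact
          let cnt := cnt.modify out 0 (fun v => v - 1)
          let nw := PySem.List.pyGetD discount (i + 9) ""
          let cnt := cnt.insert nw (cnt.getD nw 0 + 1)
          let matched := if need.contains nw = true ∧ cnt.getD nw 0 = need.getD nw 0 then matched + 1 else matched
          let answer := if matched = (need.size : Int) then answer + 1 else answer
          (cnt, matched, answer))
        (cnt, matched, answer)
    st.2.2

-- ===== PRECONDITION & SPEC =====
-- Pre_ excludes exactly the inputs where Python A raises IndexError (number shorter than want);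
-- B raises there too.
def Pre_solution (want : List String) (number : List Int) (discount : List String) : Prop :=
  want.length ≤ number.length
instance (want : List String) (number : List Int) (discount : List String) : Decidable (Pre_solution want number discount) := by unfold Pre_solution; infer_instance
def pvWitness_solution : List String × List Int × List String :=
  (["a"], [1], ["a","a","b","a","a","a","a","a","a","a","a"])

def Spec_solution (want : List String) (number : List Int) (discount : List String) (out : Int) : Prop := out = solution_alt want number discount
instance (want : List String) (number : List Int) (discount : List String) (out : Int) : Decidable (Spec_solution want number discount out) := by unfold Spec_solution; infer_instance

-- ===== CLAIM (what is proved, stated in full; the proofs are below) =====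
def Claim_equal_solution : Prop := ∀ (want : List String) (number : List Int) (discount : List String), Dom_solution want number discount → Pre_solution want number discount → Spec_solution want number discount (solution want number discount)

-- ===== LEMMAS AND PROOFS =====

-- the dict built by the (identical) first loops of A and B
def slD (want : List String) (number : List Int) : PySem.Dict String Int :=
  (PySem.List.pyRange 0 (want.length : Int) 1).foldl
    (fun d i => d.insert (PySem.List.pyGetD want i "") (PySem.List.pyGetD number i 0))
    PySem.Dict.empty

def needD (want : List String) (number : List Int) : PySem.Dict String Int :=
  (slD want number).items.foldl (fun d p => if p.2 > 0 then d.insert p.1 p.2 else d) PySem.Dict.empty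

-- count of k in the 10-day window starting at j
def wc (discount : List String) (j : Nat) (k : String) : Nat :=
  ((discount.drop j).take 10).count k

-- 'window j covers all wanted items'
def goodb (want : List String) (number : List Int) (discount : List String) (j : Nat) : Bool :=
  decide (∀ p ∈ (slD want number).items, p.2 ≤ (wc discount j p.1 : Int))

-- matched, as a countP over the needed items
def mspec (l : List (String × Int)) (g : String → Int) : Int :=
  (l.countP (fun p => decide (p.2 ≤ g p.1)) : Int)

-- B's loop body (definitionally the fold function of solution_alt)
def bstep (need : PySem.Dict String Int) (discount : List String)
    (st : PySem.Dict String Int × Int × Int) (i : Int) : PySem.Dict String Int × Int × Int :=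
  let cnt := st.1
  let matched := st.2.1
  let answer := st.2.2
  let out := PySem.List.pyGetD discount (i - 1) ""
  let matched := if need.contains out = true ∧ cnt.getD out 0 = need.getD out 0 then matched - 1 else matched
  let cnt := cnt.modify out 0 (fun v => v - 1)
  let nw := PySem.List.pyGetD discount (i + 9) ""
  let cnt := cnt.insert nw (cnt.getD nw 0 + 1)
  let matched := if need.contains nw = true ∧ cnt.getD nw 0 = need.getD nw 0 then matched + 1 else matched
  let answer := if matched = (need.size : Int) then answer + 1 else answer
  (cnt, matched, answer)

-- an int-accumulator counting fold is countP
theorem foldl_count_prop {α : Type} (P : α → Prop) [DecidablePred P] (l : List α) (s : Int) :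
    l.foldl (fun a x => if P x then a + 1 else a) s = s + (l.countP (fun x => decide (P x)) : Int) := by
  induction l generalizing s with
  | nil => simp
  | cons a t ih =>
    by_cases h : P a <;> simp [List.countP_cons, h, ih] <;> push_cast <;> ring

theorem size_insert_pos {κ ν : Type} [BEq κ] [LawfulBEq κ] (d : PySem.Dict κ ν) (k : κ) (v : ν) :
    0 < (d.insert k v).size := by
  rw [PySem.Dict.size_insert]
  split
  · rename_i h
    rw [PySem.Dict.contains_iff_mem_keys] at h
    have : d.keys ≠ [] := by intro hn; rw [hn] at h; simp at h
    have : d.keys.length ≠ 0 := by simpa [List.length_eq_zero_iff]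
    have hk : d.keys.length = d.size := by
      simp [PySem.Dict.keys, PySem.Dict.size]
    omega
  · omega

theorem subFold1_size_zero (dd : PySem.Dict String Int) (l : List (String × Int))
    (acc : PySem.Dict String Int) :
    (l.foldl (fun acc p => let n := p.2 - dd.getD p.1 0; if n > 0 then acc.insert p.1 n else acc) acc).size = 0
      ↔ acc.size = 0 ∧ ∀ p ∈ l, p.2 - dd.getD p.1 0 ≤ 0 := by
  induction l generalizing acc with
  | nil => simp
  | cons a t ih =>
    simp only [List.foldl_cons]
    by_cases h : a.2 - dd.getD a.1 0 > 0
    · simp only [h, if_pos]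
      rw [ih]
      have := size_insert_pos acc a.1 (a.2 - dd.getD a.1 0)
      constructor
      · rintro ⟨h1, -⟩; omega
      · rintro ⟨-, h2⟩
        have := h2 a (by simp)
        omega
    · simp only [h, if_neg, if_false]
      rw [ih]
      constructor
      · rintro ⟨h1, h2⟩
        refine ⟨h1, ?_⟩
        intro p hp
        rcases List.mem_cons.mp hp with rfl | hp'
        · omega
        · exact h2 p hp'
      · rintro ⟨h1, h2⟩
        exact ⟨h1, fun p hp => h2 p (by simp [hp])⟩

theorem subFold2_id (c : PySem.Dict String Int) (l : List (String × Int))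
    (r : PySem.Dict String Int) (h : ∀ p ∈ l, (0:Int) < p.2) :
    l.foldl (fun acc p => if c.contains p.1 then acc else (if 0 - p.2 > 0 then acc.insert p.1 (0 - p.2) else acc)) r = r := by
  induction l generalizing r with
  | nil => simp
  | cons a t ih =>
    have ha := h a (by simp)
    simp only [List.foldl_cons]
    have : (if c.contains a.1 = true then r else (if 0 - a.2 > 0 then r.insert a.1 (0 - a.2) else r)) = r := by
      split
      · rfl
      · rw [if_neg (by omega)]
    rw [this]
    exact ih r (fun p hp => h p (by simp [hp]))

theorem counter_items_pos (xs : List String) :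
    ∀ p ∈ (PySem.Dict.counter xs).items, (0:Int) < p.2 := by
  intro p hp
  rw [PySem.Dict.items_counter] at hp
  simp only [List.mem_map] at hp
  obtain ⟨k, hk, rfl⟩ := hp
  rw [PySem.Set.mem_ofList] at hk
  have := List.count_pos_iff.mpr hk
  simpa using this

theorem counterSub_size_zero (c d : PySem.Dict String Int)
    (hd : ∀ p ∈ d.items, (0:Int) < p.2) :
    ((counterSub c d).size = 0) ↔ ∀ p ∈ c.items, p.2 ≤ d.getD p.1 0 := by
  unfold counterSub
  rw [subFold2_id c d.items _ hd]
  rw [subFold1_size_zero]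
  simp only [PySem.Dict.size_empty, true_and]
  constructor
  · intro h p hp; have := h p hp; omega
  · intro h p hp; have := h p hp; omega

-- A computes the number of good windows
theorem A_eq (want : List String) (number : List Int) (discount : List String) :
    solution want number discount
      = ((List.range (discount.length - 9)).countP (goodb want number discount) : Int) := by
  show (PySem.List.pyRange 0 ((discount.length : Int) - 9) 1).foldl
      (fun answer i =>
        if (counterSub (slD want number)
              (PySem.Dict.counter (PySem.List.slice discount (some i) (some (i + 10))))).size = 0
        then answer + 1 else answer) 0
    = ((List.range (discount.length - 9)).countP (goodb want number discount) : Int)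
  rw [PySem.List.pyRange_one, List.foldl_map]
  have htn : (((discount.length : Int) - 9) - 0).toNat = discount.length - 9 := by omega
  rw [htn]
  rw [foldl_count_prop (fun k : Nat =>
        (counterSub (slD want number)
            (PySem.Dict.counter (PySem.List.slice discount (some ((0:Int) + (k:Int)))
              (some ((0:Int) + (k:Int) + 10))))).size = 0)]
  rw [zero_add]
  congr 1
  apply List.countP_congr
  intro k _
  simp only [decide_eq_true_iff]
  unfold goodb
  have h0 : ((0:Int) + (k:Int)) = ((k:Nat) : Int) := by push_cast; ring
  rw [h0]
  have h10 : ((k:Int) + 10) = ((k:Nat) : Int) + ((10:Nat) : Int) := by push_cast; ring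
  rw [h10, PySem.List.slice_natCast_add]
  rw [counterSub_size_zero _ _ (counter_items_pos _)]
  simp only [PySem.Dict.getD_counter, decide_eq_true_iff]
  unfold wc
  rfl

theorem nodup_sl_keys (want : List String) (number : List Int) : (slD want number).keys.Nodup := by
  unfold slD
  exact PySem.Dict.nodup_keys_foldl_insert_key _ _ _ _ PySem.Dict.nodup_keys_empty

theorem needD_items (want : List String) (number : List Int) :
    (needD want number).items = (slD want number).items.filter (fun p => decide (p.2 > 0)) := by
  unfold needD
  have h1 : ((slD want number).items.foldl (fun d p => if p.2 > 0 then d.insert p.1 p.2 else d) PySem.Dict.empty)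
      = (((slD want number).items.filter (fun p => decide (p.2 > 0))).foldl (fun d p => d.insert p.1 p.2) PySem.Dict.empty) := by
    rw [← PySem.List.foldl_if_eq_foldl_filter (fun p : String × Int => decide (p.2 > 0))
          (fun (d : PySem.Dict String Int) (p : String × Int) => d.insert p.1 p.2)
          (slD want number).items PySem.Dict.empty]
    apply PySem.List.foldl_congr_mem
    intro acc x _
    by_cases h : (x.2 : Int) > 0 <;> simp [h]
  rw [h1]
  rw [PySem.Dict.items_foldl_insert_fresh _ Prod.fst Prod.snd PySem.Dict.empty
        (by intro a _; exact PySem.Dict.contains_empty _)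
        ?nd]
  · simp [PySem.Dict.empty]
  case nd =>
    have hk : (slD want number).keys.Nodup := nodup_sl_keys want number
    have hsub : (((slD want number).items.filter (fun p => decide (p.2 > 0))).map Prod.fst).Sublist ((slD want number).items.map Prod.fst) :=
      List.filter_sublist.map Prod.fst
    have : ((slD want number).items.map Prod.fst).Nodup := by
      simpa [PySem.Dict.keys] using hk
    exact this.sublist hsub

theorem nodup_need_keys (want : List String) (number : List Int) :
    ((needD want number).items.map Prod.fst).Nodup := by
  rw [needD_items]
  have hk : (slD want number).keys.Nodup := nodup_sl_keys want number
  have : ((slD want number).items.map Prod.fst).Nodup := by simpa [PySem.Dict.keys] using hk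
  exact this.sublist (List.filter_sublist.map Prod.fst)

-- countP under a point decrement of the threshold function
theorem countP_update_dec (l : List (String × Int)) (hnd : (l.map Prod.fst).Nodup)
    (g g' : String → Int) (k : String) (hk : g' k = g k - 1) (hne : ∀ x, x ≠ k → g' x = g x) :
    (l.countP (fun p => decide (p.2 ≤ g' p.1)) : Int)
      = (l.countP (fun p => decide (p.2 ≤ g p.1)) : Int) - (if (k, g k) ∈ l then 1 else 0) := by
  induction l with
  | nil => simp
  | cons a t ih =>
    simp only [List.map_cons, List.nodup_cons] at hnd
    obtain ⟨hak, hndt⟩ := hnd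
    have iht := ih hndt
    by_cases ha : a.1 = k
    · have htk : ∀ p ∈ t, p.1 ≠ k := by
        intro p hp hpk
        exact hak (by rw [← ha] at hpk; exact hpk ▸ List.mem_map_of_mem hp)
      have hteq : t.countP (fun p => decide (p.2 ≤ g' p.1)) = t.countP (fun p => decide (p.2 ≤ g p.1)) := by
        apply List.countP_congr
        intro p hp
        rw [hne p.1 (htk p hp)]
      have hmem : ((k, g k) ∈ a :: t) ↔ a.2 = g k := by
        constructor
        · intro hm
          rcases List.mem_cons.mp hm with he | hm
          · rw [← he]
          · exact absurd rfl (htk _ hm)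
        · intro hv
          exact List.mem_cons.mpr (Or.inl (Prod.ext ha hv).symm)
      simp only [List.countP_cons, hteq, hmem]
      simp only [ha, hk, decide_eq_true_eq]
      split_ifs <;> push_cast <;> omega
    · have hmem : ((k, g k) ∈ a :: t) ↔ ((k, g k) ∈ t) := by
        constructor
        · intro hm
          rcases List.mem_cons.mp hm with he | hm
          · exact absurd (congrArg Prod.fst he).symm ha
          · exact hm
        · intro hm; exact List.mem_cons_of_mem _ hm
      have hhead : (decide (a.2 ≤ g' a.1)) = (decide (a.2 ≤ g a.1)) := by rw [hne a.1 ha]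
      simp only [List.countP_cons, hhead, hmem]
      by_cases hm : (k, g k) ∈ t <;>
        simp only [hm, if_true, if_false] at iht ⊢ <;> push_cast at iht ⊢ <;> omega

-- countP under a point increment of the threshold function
theorem countP_update_inc (l : List (String × Int)) (hnd : (l.map Prod.fst).Nodup)
    (g g' : String → Int) (k : String) (hk : g' k = g k + 1) (hne : ∀ x, x ≠ k → g' x = g x) :
    (l.countP (fun p => decide (p.2 ≤ g' p.1)) : Int)
      = (l.countP (fun p => decide (p.2 ≤ g p.1)) : Int) + (if (k, g' k) ∈ l then 1 else 0) := by
  induction l with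
  | nil => simp
  | cons a t ih =>
    simp only [List.map_cons, List.nodup_cons] at hnd
    obtain ⟨hak, hndt⟩ := hnd
    have iht := ih hndt
    by_cases ha : a.1 = k
    · have htk : ∀ p ∈ t, p.1 ≠ k := by
        intro p hp hpk
        exact hak (by rw [← ha] at hpk; exact hpk ▸ List.mem_map_of_mem hp)
      have hteq : t.countP (fun p => decide (p.2 ≤ g' p.1)) = t.countP (fun p => decide (p.2 ≤ g p.1)) := by
        apply List.countP_congr
        intro p hp
        rw [hne p.1 (htk p hp)]
      have hmem : ((k, g' k) ∈ a :: t) ↔ a.2 = g' k := by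
        constructor
        · intro hm
          rcases List.mem_cons.mp hm with he | hm
          · rw [← he]
          · exact absurd rfl (htk _ hm)
        · intro hv
          exact List.mem_cons.mpr (Or.inl (Prod.ext ha hv).symm)
      simp only [List.countP_cons, hteq, hmem]
      simp only [ha, hk, decide_eq_true_eq]
      split_ifs <;> push_cast <;> omega
    · have hmem : ((k, g' k) ∈ a :: t) ↔ ((k, g' k) ∈ t) := by
        constructor
        · intro hm
          rcases List.mem_cons.mp hm with he | hm
          · exact absurd (congrArg Prod.fst he).symm ha
          · exact hm
        · intro hm; exact List.mem_cons_of_mem _ hm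
      have hhead : (decide (a.2 ≤ g' a.1)) = (decide (a.2 ≤ g a.1)) := by rw [hne a.1 ha]
      simp only [List.countP_cons, hhead, hmem]
      by_cases hm : (k, g' k) ∈ t <;>
        simp only [hm, if_true, if_false] at iht ⊢ <;> push_cast at iht ⊢ <;> omega

-- B's membership-and-value test is membership of the pair in need.items
theorem cond_iff_mem (want : List String) (number : List Int) (k : String) (x : Int) :
    ((needD want number).contains k = true ∧ x = (needD want number).getD k 0)
      ↔ (k, x) ∈ (needD want number).items := by
  have hnd : (needD want number).keys.Nodup := by
    simpa [PySem.Dict.keys] using nodup_need_keys want number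
  constructor
  · rintro ⟨hc, hx⟩
    rw [PySem.Dict.contains_eq_isSome_get?] at hc
    cases hg : (needD want number).get? k with
    | none => rw [hg] at hc; simp at hc
    | some v =>
      have hx' : x = v := by
        rw [PySem.Dict.getD_eq_get?_getD, hg] at hx; simpa using hx
      subst hx'
      exact (PySem.Dict.get?_eq_some_iff_mem_items _ _ _ hnd).mp hg
  · intro hm
    have hg := (PySem.Dict.get?_eq_some_iff_mem_items _ _ _ hnd).mpr hm
    constructor
    · rw [PySem.Dict.contains_eq_isSome_get?, hg]; rfl
    · rw [PySem.Dict.getD_eq_get?_getD, hg]; rfl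

-- good in terms of matched
theorem good_iff_full (want : List String) (number : List Int) (discount : List String) (j : Nat) :
    goodb want number discount j = true
      ↔ mspec (needD want number).items (fun k => (wc discount j k : Int))
          = ((needD want number).size : Int) := by
  unfold goodb mspec
  rw [decide_eq_true_iff]
  have hsize : ((needD want number).size : Int) = (((needD want number).items.length : Nat) : Int) := by
    simp [PySem.Dict.size]
  rw [hsize, Nat.cast_inj, List.countP_eq_length]
  constructor
  · intro h p hp
    rw [needD_items] at hp
    have := h p (List.mem_of_mem_filter hp)
    simpa using this
  · intro h p hp
    by_cases hpos : p.2 > 0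
    · have hp' : p ∈ (needD want number).items := by
        rw [needD_items]; exact List.mem_filter.mpr ⟨hp, by simpa⟩
      have := h p hp'
      simpa using this
    · have h0 : (0:Int) ≤ (wc discount j p.1 : Int) := by positivity
      omega

-- the window shift identity
theorem wshift (discount : List String) (j : Nat) (h : j + 11 ≤ discount.length) (k : String) :
    (wc discount j k : Int) + (if k = discount.getD (j+10) "" then 1 else 0)
      = (wc discount (j+1) k : Int) + (if k = discount.getD j "" then 1 else 0) := by
  have hj : j < discount.length := by omega
  have hj10 : j + 10 < discount.length := by omega
  have hdrop : discount.drop j = discount[j] :: discount.drop (j+1) := List.drop_eq_getElem_cons hj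
  have hget9 : (discount.drop (j+1))[9]? = some discount[j+10] := by
    rw [List.getElem?_drop, List.getElem?_eq_getElem (by omega)]
  have hten : (10:Nat) = 9 + 1 := by norm_num
  have htake : (discount.drop (j+1)).take (9+1) = (discount.drop (j+1)).take 9 ++ [discount[j+10]] := by
    rw [List.take_succ, hget9]
    rfl
  have h1 : wc discount j k = (if discount[j] = k then 1 else 0) + ((discount.drop (j+1)).take 9).count k := by
    unfold wc
    conv_lhs => rw [hdrop, hten]
    rw [List.take_succ_cons, List.count_cons]
    simp [beq_iff_eq]
    omega
  have h2 : wc discount (j+1) k = ((discount.drop (j+1)).take 9).count k + (if discount[j+10] = k then 1 else 0) := by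
    unfold wc
    conv_lhs => rw [hten]
    rw [htake, List.count_append]
    simp [List.count_singleton, beq_iff_eq]
  have hgj : discount.getD j "" = discount[j] := List.getD_eq_getElem _ _ hj
  have hgj10 : discount.getD (j+10) "" = discount[j+10] := List.getD_eq_getElem _ _ hj10
  rw [hgj, hgj10, h1, h2]
  by_cases hk1 : discount[j] = k <;> by_cases hk2 : discount[j+10] = k
  · rw [if_pos hk1, if_pos hk2.symm, if_pos hk2, if_pos hk1.symm]; push_cast; omega
  · rw [if_pos hk1, if_neg (fun h => hk2 h.symm), if_neg hk2, if_pos hk1.symm]; push_cast; omega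
  · rw [if_neg hk1, if_pos hk2.symm, if_pos hk2, if_neg (fun h => hk1 h.symm)]; push_cast; omega
  · rw [if_neg hk1, if_neg (fun h => hk2 h.symm), if_neg hk2, if_neg (fun h => hk1 h.symm)]; push_cast; omega

def BInv (want : List String) (number : List Int) (discount : List String) (j : Nat)
    (s : PySem.Dict String Int × Int × Int) : Prop :=
  (∀ k, s.1.getD k 0 = (wc discount j k : Int))
  ∧ s.2.1 = mspec (needD want number).items (fun k => (wc discount j k : Int))
  ∧ s.2.2 = ((List.range (j+1)).countP (goodb want number discount) : Int)

theorem shift_core (discount : List String) (j : Nat) (h : j + 11 ≤ discount.length)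
    (out nw : String) (hout : out = discount.getD j "") (hnw : nw = discount.getD (j+10) "")
    (k : String) :
    (if k = nw then (if nw = out then (wc discount j out : Int) - 1 else (wc discount j nw : Int)) + 1
     else (if k = out then (wc discount j out : Int) - 1 else (wc discount j k : Int)))
    = (wc discount (j+1) k : Int) := by
  have hw := wshift discount j h k
  rw [← hout, ← hnw] at hw
  clear hout hnw
  by_cases hk1 : k = nw
  · subst hk1
    rw [if_pos rfl] at hw
    rw [if_pos rfl]
    by_cases hk2 : k = out
    · subst hk2
      rw [if_pos rfl] at hw ⊢
      omega
    · rw [if_neg hk2] at hw ⊢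
      omega
  · rw [if_neg hk1] at hw ⊢
    by_cases hk2 : k = out
    · subst hk2
      rw [if_pos rfl] at hw ⊢
      omega
    · rw [if_neg hk2] at hw ⊢
      omega

theorem matched_step (want : List String) (number : List Int) (discount : List String)
    (j : Nat) (C : PySem.Dict String Int) (M : Int)
    (h : j + 11 ≤ discount.length)
    (hC : ∀ k, C.getD k 0 = (wc discount j k : Int))
    (hM : M = mspec (needD want number).items (fun k => (wc discount j k : Int))) :
    (if (needD want number).contains (discount.getD (j+10) "") = true ∧
        ((C.modify (discount.getD j "") 0 (fun v => v - 1)).insert (discount.getD (j+10) "")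
            ((C.modify (discount.getD j "") 0 (fun v => v - 1)).getD (discount.getD (j+10) "") 0 + 1)).getD
          (discount.getD (j+10) "") 0 = (needD want number).getD (discount.getD (j+10) "") 0
     then (if (needD want number).contains (discount.getD j "") = true ∧
              C.getD (discount.getD j "") 0 = (needD want number).getD (discount.getD j "") 0
           then M - 1 else M) + 1
     else (if (needD want number).contains (discount.getD j "") = true ∧
              C.getD (discount.getD j "") 0 = (needD want number).getD (discount.getD j "") 0
           then M - 1 else M))
    = mspec (needD want number).items (fun k => (wc discount (j+1) k : Int)) := by
  set out := discount.getD j "" with hout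
  set nw := discount.getD (j+10) "" with hnw
  set g : String → Int := fun k => (wc discount j k : Int) with hg
  set gmid : String → Int := fun k => if k = out then g out - 1 else g k with hgmid
  set gfin : String → Int := fun k => if k = nw then gmid nw + 1 else gmid k with hgfin
  have hCmid : ∀ k, (C.modify out 0 (fun v => v - 1)).getD k 0 = gmid k := by
    intro k
    rw [PySem.Dict.getD_modify]
    by_cases hk : k = out <;> simp [hgmid, hg, hk, hC k, hC out]
  have hCfin : ∀ k,
      (((C.modify out 0 (fun v => v - 1)).insert nw
          ((C.modify out 0 (fun v => v - 1)).getD nw 0 + 1)).getD k 0) = gfin k := by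
    intro k
    rw [PySem.Dict.getD_insert]
    by_cases hk : k = nw <;> simp [hgfin, hk, hCmid]
  have hgfin_wc : ∀ k, gfin k = (wc discount (j+1) k : Int) := by
    intro k
    simp only [hgfin, hgmid, hg]
    exact shift_core discount j (by omega) out nw hout hnw k
  have hd := countP_update_dec (needD want number).items (nodup_need_keys want number) g gmid out
    (by simp [hgmid]) (by intro x hx; simp [hgmid, hx])
  have hi := countP_update_inc (needD want number).items (nodup_need_keys want number) gmid gfin nw
    (by simp [hgfin]) (by intro x hx; simp [hgfin, hx])
  have hcond1 : ((needD want number).contains out = true ∧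
        C.getD out 0 = (needD want number).getD out 0)
      ↔ (out, g out) ∈ (needD want number).items := by
    have h' := cond_iff_mem want number out (g out)
    rw [hC out]
    simp only [hg] at h' ⊢
    exact h'
  have hcond2 : ((needD want number).contains nw = true ∧
        ((C.modify out 0 (fun v => v - 1)).insert nw
          ((C.modify out 0 (fun v => v - 1)).getD nw 0 + 1)).getD nw 0 = (needD want number).getD nw 0)
      ↔ (nw, gfin nw) ∈ (needD want number).items := by
    rw [hCfin nw]
    exact cond_iff_mem want number nw (gfin nw)
  have hmsp : mspec (needD want number).items gfin
      = mspec (needD want number).items (fun k => (wc discount (j+1) k : Int)) := by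
    unfold mspec
    congr 1
    apply List.countP_congr
    intro p _
    rw [hgfin_wc p.1]
  rw [← hmsp, hM]
  by_cases hm1 : (out, g out) ∈ (needD want number).items <;>
    by_cases hm2 : (nw, gfin nw) ∈ (needD want number).items
  all_goals simp only [hcond1, hcond2, hm1, hm2, if_true, if_false]
  all_goals simp only [hm1, hm2, if_true, if_false] at hd hi
  all_goals unfold mspec
  all_goals omega

theorem step_preserves (want : List String) (number : List Int) (discount : List String)
    (j : Nat) (h : j + 11 ≤ discount.length) (s : PySem.Dict String Int × Int × Int)
    (hs : BInv want number discount j s) :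
    BInv want number discount (j+1) (bstep (needD want number) discount s (1 + (j:Int))) := by
  obtain ⟨hC, hM, hA⟩ := hs
  obtain ⟨C, M, A⟩ := s
  simp only at hC hM hA
  have hidx1 : (1 + (j:Int)) - 1 = ((j:Nat) : Int) := by push_cast; ring
  have hidx2 : (1 + (j:Int)) + 9 = (((j+10):Nat) : Int) := by push_cast; ring
  unfold bstep
  simp only [hidx1, hidx2, PySem.List.pyGetD_natCast]
  have hmatched := matched_step want number discount j C M h hC hM
  refine ⟨?_, ?_, ?_⟩
  · intro k
    rw [PySem.Dict.getD_insert, PySem.Dict.getD_modify, PySem.Dict.getD_modify]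
    simp only [hC]
    exact shift_core discount j (by omega) _ _ rfl rfl k
  · exact hmatched
  · rw [hmatched, List.range_succ, List.countP_append, hA]
    by_cases hg1 : goodb want number discount (j+1) = true
    · rw [if_pos ((good_iff_full want number discount (j+1)).mp hg1)]
      simp only [List.countP_cons, List.countP_nil, hg1, if_pos]
      push_cast
      ring
    · rw [if_neg (fun hh => hg1 ((good_iff_full want number discount (j+1)).mpr hh))]
      rw [Bool.not_eq_true] at hg1
      simp [List.countP_cons, hg1]

def cnt0D (discount : List String) : PySem.Dict String Int :=
  (PySem.List.slice discount none (some 10)).foldl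
    (fun d x => d.insert x (d.getD x 0 + 1)) PySem.Dict.empty

def m0D (want : List String) (number : List Int) (discount : List String) : Int :=
  (needD want number).items.foldl
    (fun s p => if (cnt0D discount).getD p.1 0 ≥ p.2 then s + 1 else s) 0

def a0D (want : List String) (number : List Int) (discount : List String) : Int :=
  if m0D want number discount = (((needD want number).size : Nat) : Int) then 1 else 0

theorem cnt0_getD (discount : List String) :
    ∀ k, (cnt0D discount).getD k 0 = (wc discount 0 k : Int) := by
  intro k
  unfold cnt0D
  rw [PySem.List.slice_to discount (by norm_num : (0:Int) ≤ 10)]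
  rw [PySem.Dict.foldl_insert_getD_add_one_eq_counter, PySem.Dict.getD_counter]
  unfold wc
  norm_num
  rfl

theorem m0_eq (want : List String) (number : List Int) (discount : List String) :
    m0D want number discount = mspec (needD want number).items (fun k => (wc discount 0 k : Int)) := by
  unfold m0D
  rw [foldl_count_prop (fun p : String × Int => (cnt0D discount).getD p.1 0 ≥ p.2), zero_add]
  unfold mspec
  congr 1
  apply List.countP_congr
  intro p _
  simp [ge_iff_le, cnt0_getD discount p.1]

theorem a0_eq (want : List String) (number : List Int) (discount : List String) :
    a0D want number discount = ((List.range 1).countP (goodb want number discount) : Int) := by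
  unfold a0D
  rw [m0_eq]
  have hiff := good_iff_full want number discount 0
  have h1 : (List.range 1) = [0] := rfl
  rw [h1]
  by_cases hg : goodb want number discount 0 = true
  · rw [if_pos (hiff.mp hg)]
    simp [hg]
  · rw [if_neg (fun hh => hg (hiff.mpr hh))]
    rw [Bool.not_eq_true] at hg
    simp [hg]

theorem loop_inv (want : List String) (number : List Int) (discount : List String)
    (init : PySem.Dict String Int × Int × Int)
    (h0 : BInv want number discount 0 init) :
    ∀ j, j ≤ discount.length - 10 → 10 ≤ discount.length →
      BInv want number discount j
        ((PySem.List.pyRange 1 (1 + (j:Int)) 1).foldl (bstep (needD want number) discount) init) := by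
  intro j
  induction j with
  | zero =>
    intro _ _
    have h1 : (1 + ((0:Nat):Int)) = 1 := by norm_num
    rw [h1, PySem.List.pyRange_one_eq_nil le_rfl]
    simpa using h0
  | succ n ih =>
    intro hn h10
    have hle : (1:Int) ≤ 1 + (n:Int) := by omega
    have hcast : (1 + (((n+1):Nat):Int)) = (1 + (n:Int)) + 1 := by push_cast; ring
    rw [hcast, PySem.List.pyRange_one_succ_right hle, List.foldl_append]
    simp only [List.foldl_cons, List.foldl_nil]
    exact step_preserves want number discount n (by omega) _ (ih (by omega) h10)

theorem B_eq (want : List String) (number : List Int) (discount : List String) :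
    solution_alt want number discount
      = ((List.range (discount.length - 9)).countP (goodb want number discount) : Int) := by
  have hdef : solution_alt want number discount
      = (if (discount.length : Int) < 10 then (0:Int)
         else ((PySem.List.pyRange 1 ((discount.length : Int) - 9) 1).foldl
            (bstep (needD want number) discount)
            (cnt0D discount, m0D want number discount, a0D want number discount)).2.2) := rfl
  rw [hdef]
  by_cases hlen : (discount.length : Int) < 10
  · rw [if_pos hlen]
    have h9 : discount.length - 9 = 0 := by omega
    rw [h9]
    simp
  · rw [if_neg hlen]
    have h10 : 10 ≤ discount.length := by omega
    have h0 : BInv want number discount 0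
        (cnt0D discount, m0D want number discount, a0D want number discount) :=
      ⟨cnt0_getD discount, m0_eq want number discount, a0_eq want number discount⟩
    have hkey := loop_inv want number discount _ h0 (discount.length - 10) le_rfl h10
    have hb : (1 + (((discount.length - 10) : Nat) : Int)) = (discount.length : Int) - 9 := by
      have := Nat.cast_sub h10 (R := Int)
      omega
    rw [hb] at hkey
    have hfin := hkey.2.2
    rw [hfin]
    have h11 : discount.length - 10 + 1 = discount.length - 9 := by omega
    rw [h11]

-- ===== VERDICT (by name: the statement is the Claim_ definition above) =====
theorem solution_spec : Claim_equal_solution := by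
  intro want number discount _ _
  unfold Spec_solution
  rw [A_eq, B_eq]
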